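-- pv_equiv track=rewrite | github.com/bedbugs-bit/Leetcode-Python | prefix_sum/stable_segments.py | countStableSegments
-- ===== SOURCE A (Python) =====
-- def countStableSegments(capacity):
--     num_servers = len(capacity)
--     prefix_sum = [0] * (num_servers + 1)
--
--     # Compute prefix sum
--     for i in range(num_servers):
--         prefix_sum[i + 1] = prefix_sum[i] + capacity[i]
--
--     stable_sub_segment_count = 0
--
--     # Iterate over all possible start indices
--     for start_index in range(num_servers):
--         # Expand the end index for subsegments of length >= 3
--         for end_index in range(start_index + 2, num_servers):
--             # Check if the first and last elements are equal
--             if capacity[start_index] != capacity[end_index]: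
--                 continue
--
--             # Calculate the interior sum using the prefix sum array
--             interior_sum = prefix_sum[end_index] - prefix_sum[start_index + 1]
--
--             # Check if the subsegment is stable
--             if capacity[start_index] == interior_sum:
--                 stable_sub_segment_count += 1
--
--             # Stop expanding if the interior sum exceeds the first element
--             if interior_sum > capacity[start_index]:
--                 break
--
--     return stable_sub_segment_count
-- ===== SOURCE B (Python) =====
-- def countStableSegments(capacity):
--     prefix = [0]
--     run = 0
--     for x in capacity:
--         run += x
--         prefix.append(run)
--     pos = {}
--     for i, v in enumerate(capacity):
--         pos.setdefault(v, []).append(i)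
--     total = 0
--     for s in range(len(capacity)):
--         v = capacity[s]
--         t = prefix[s + 1] + v
--         for e in pos[v]:
--             if e < s + 2:
--                 continue
--             p = prefix[e]
--             if p == t:
--                 total += 1
--             elif p > t:
--                 break
--     return total
-- ===== Notes on version B (the rewrite author's own statement) =====
-- stated objective: faster
-- what changed: B builds the prefix array with a running sum and groups indices by value in a dict built once, so each start only scans the positions holding its own value (with the same early break) instead of scanning every later index.
import Mathlib
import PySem

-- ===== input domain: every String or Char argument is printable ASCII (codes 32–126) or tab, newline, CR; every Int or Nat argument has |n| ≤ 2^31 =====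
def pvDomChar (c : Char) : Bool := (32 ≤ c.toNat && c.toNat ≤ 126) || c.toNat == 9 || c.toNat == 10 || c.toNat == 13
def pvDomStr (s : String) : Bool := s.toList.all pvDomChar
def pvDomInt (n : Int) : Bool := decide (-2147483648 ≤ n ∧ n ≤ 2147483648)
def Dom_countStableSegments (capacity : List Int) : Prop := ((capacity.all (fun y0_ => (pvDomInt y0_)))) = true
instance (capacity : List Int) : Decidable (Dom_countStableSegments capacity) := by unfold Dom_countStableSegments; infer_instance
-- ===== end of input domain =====

-- B replaces A's scan over all later end indices by a dict of positions grouped by value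
-- (built once) and a running-sum prefix array: same count, faster on varied data.


-- ===== PORT A =====
-- prefix_sum built by indexed assignment into a zero array (all indices are provably in
-- range, so pyGetD/List.set with default 0 are exact here)
def prefA (capacity : List Int) : List Int :=
  (PySem.List.pyRange 0 (capacity.length : Int) 1).foldl
    (fun p i => p.set (i.toNat + 1)
      (PySem.List.pyGetD p i 0 + PySem.List.pyGetD capacity i 0))
    (List.replicate (capacity.length + 1) 0)

-- the inner 'for end_index in range(start_index+2, n)' loop with continue/break
def innerA (capacity pre : List Int) (s : Int) : List Int → Int → Int
  | [], acc => acc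
  | e :: rest, acc =>
    if PySem.List.pyGetD capacity s 0 ≠ PySem.List.pyGetD capacity e 0 then
      innerA capacity pre s rest acc
    else
      let interior := PySem.List.pyGetD pre e 0 - PySem.List.pyGetD pre (s + 1) 0
      let acc' := if PySem.List.pyGetD capacity s 0 = interior then acc + 1 else acc
      if interior > PySem.List.pyGetD capacity s 0 then acc' else innerA capacity pre s rest acc'

def countStableSegments (capacity : List Int) : Int :=
  let n : Int := capacity.length
  let pre := prefA capacity
  (PySem.List.pyRange 0 n 1).foldl
    (fun acc s => innerA capacity pre s (PySem.List.pyRange (s + 2) n 1) acc) 0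

-- ===== PORT B =====
-- prefix built by appending a running sum
def prefB (capacity : List Int) : List Int :=
  (capacity.foldl (fun (st : List Int × Int) x =>
      (st.1 ++ [st.2 + x], st.2 + x)) ([0], 0)).1

-- pos: dict value ↦ list of its indices; pos.setdefault(v, []).append(i) = Dict.modify
def posDict (capacity : List Int) : PySem.Dict Int (List Int) :=
  (PySem.List.enumerate capacity 0).foldl
    (fun d iv => d.modify iv.2 [] (· ++ [iv.1])) PySem.Dict.empty

-- the inner 'for e in pos[v]' loop with continue/break
def innerB (pre : List Int) (s t : Int) : List Int → Int → Int
  | [], total => total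
  | e :: rest, total =>
    if e < s + 2 then innerB pre s t rest total
    else
      let p := PySem.List.pyGetD pre e 0
      if p = t then innerB pre s t rest (total + 1)
      else if p > t then total
      else innerB pre s t rest total

def countStableSegments_alt (capacity : List Int) : Int :=
  let n : Int := capacity.length
  let pre := prefB capacity
  let pos := posDict capacity
  (PySem.List.pyRange 0 n 1).foldl
    (fun total s =>
      let v := PySem.List.pyGetD capacity s 0
      let t := PySem.List.pyGetD pre (s + 1) 0 + v
      -- pos[v] cannot raise: v = capacity[s] was inserted, so getD is exact
      innerB pre s t (pos.getD v []) total) 0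

-- ===== PRECONDITION & SPEC =====
def Spec_countStableSegments (capacity : List Int) (out : Int) : Prop := out = countStableSegments_alt capacity
instance (capacity : List Int) (out : Int) : Decidable (Spec_countStableSegments capacity out) := by unfold Spec_countStableSegments; infer_instance

-- ===== CLAIM (what is proved, stated in full; the proofs are below) =====
def Claim_equal_countStableSegments : Prop := ∀ (capacity : List Int), Dom_countStableSegments capacity → Spec_countStableSegments capacity (countStableSegments capacity)

-- ===== LEMMAS AND PROOFS =====

-- both prefix constructions produce the list of partial sums
def psums (capacity : List Int) : List Int :=
  (List.range (capacity.length + 1)).map (fun i => ((capacity.take i).sum))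

theorem prefB_aux (l : List Int) : ∀ (acc : List Int) (run : Int),
    (l.foldl (fun (st : List Int × Int) x => (st.1 ++ [st.2 + x], st.2 + x)) (acc, run)).1
      = acc ++ (List.range l.length).map (fun i => run + (l.take (i + 1)).sum) := by
  induction l with
  | nil => simp
  | cons x xs ih =>
    intro acc run
    simp only [List.foldl_cons, List.length_cons, List.range_succ_eq_map, List.map_cons,
      List.map_map, ih]
    simp [Function.comp, List.append_assoc]
    intro a _; ring

theorem prefB_eq_psums (capacity : List Int) : prefB capacity = psums capacity := by
  rw [prefB, prefB_aux, psums, List.range_succ_eq_map]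
  simp [List.map_map, Function.comp]

theorem prefA_aux (capacity : List Int) : ∀ (k : Nat), k ≤ capacity.length →
    (PySem.List.pyRange 0 (k : Int) 1).foldl
      (fun p i => p.set (i.toNat + 1)
        (PySem.List.pyGetD p i 0 + PySem.List.pyGetD capacity i 0))
      (List.replicate (capacity.length + 1) 0)
    = (List.range (k + 1)).map (fun i => (capacity.take i).sum)
        ++ List.replicate (capacity.length - k) 0 := by
  intro k
  induction k with
  | zero =>
    intro _
    simp [PySem.List.pyRange_one_eq_nil, List.replicate_succ]
  | succ k ih =>
    intro hk
    have hk' : k ≤ capacity.length := Nat.le_of_succ_le hk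
    have hcast : ((k + 1 : Nat) : Int) = (k : Int) + 1 := by push_cast; ring
    rw [hcast, PySem.List.pyRange_one_succ_right (by positivity), List.foldl_append, ih hk']
    simp only [List.foldl_cons, List.foldl_nil]
    have hlen : ((List.range (k + 1)).map (fun i => (capacity.take i).sum)).length = k + 1 := by
      simp
    have hget : PySem.List.pyGetD ((List.range (k + 1)).map (fun i => (capacity.take i).sum)
        ++ List.replicate (capacity.length - k) 0) (k : Int) 0 = (capacity.take k).sum := by
      rw [PySem.List.pyGetD_natCast]
      rw [List.getD_append _ _ _ _ (by omega)]
      simp [List.getD_eq_getElem?_getD]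
    have hgetc : PySem.List.pyGetD capacity (k : Int) 0 = capacity[k]! := by
      rw [PySem.List.pyGetD_natCast]
      simp [List.getD_eq_getElem?_getD, List.getElem!_eq_getElem?_getD]
    rw [hget, hgetc]
    have htoNat : ((k : Int)).toNat = k := by omega
    rw [htoNat]
    rw [List.set_append]
    simp only [hlen]
    have : ¬ (k + 1 < k + 1) := by omega
    rw [if_neg this]
    have hrep : List.replicate (capacity.length - k) (0 : Int)
        = 0 :: List.replicate (capacity.length - (k + 1)) 0 := by
      have : capacity.length - k = (capacity.length - (k + 1)) + 1 := by omega
      rw [this, List.replicate_succ]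
    rw [hrep]
    simp only [Nat.sub_self, List.set_cons_zero]
    rw [List.range_succ (n := k + 1), List.map_append]
    simp only [List.map_cons, List.map_nil, List.append_assoc]
    congr 2
    rw [List.sum_take_succ capacity k (by omega)]
    simp [List.getElem!_eq_getElem?_getD, List.getElem?_eq_getElem (by omega : k < capacity.length)]

theorem prefA_eq_psums (capacity : List Int) : prefA capacity = psums capacity := by
  rw [prefA, prefA_aux capacity capacity.length le_rfl]
  simp [psums]

-- the grouping dict: pos[v] is exactly the increasing list of indices holding v
theorem posDict_getD (capacity : List Int) (v : Int) :
    (posDict capacity).getD v []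
      = (PySem.List.pyRange 0 (capacity.length : Int) 1).filter
          (fun j => PySem.List.pyGetD capacity j 0 == v) := by
  have hswap : posDict capacity
      = ((PySem.List.enumerate capacity 0).map Prod.swap).foldl
          (fun d p => d.modify p.1 [] (· ++ [p.2])) PySem.Dict.empty := by
    rw [List.foldl_map]
    rfl
  rw [hswap, PySem.Dict.getD_foldl_modify_append]
  rw [PySem.List.enumerate_eq_map_pyRange (d := 0)]
  rw [show (PySem.Dict.empty : PySem.Dict Int (List Int)).getD v [] = [] from rfl]
  simp only [List.nil_append, List.map_map, List.filter_map, Function.comp_def, Prod.swap,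
    PySem.List.len]
  exact List.map_id _

-- innerB ignores entries below s+2
theorem innerB_skip (pre : List Int) (s t : Int) (l : List Int) (total : Int) :
    innerB pre s t l total
      = innerB pre s t (l.filter (fun e => !decide (e < s + 2))) total := by
  induction l generalizing total with
  | nil => rfl
  | cons e rest ih =>
    by_cases h : e < s + 2
    · simp [innerB, h, ih]
    · simp only [innerB, List.filter_cons, h, decide_false, Bool.not_false, if_pos]
      split_ifs <;> simp [ih]

-- A's inner loop equals B's inner loop on the value-filtered candidate list
theorem innerA_eq_innerB (capacity pre : List Int) (s : Int) (l : List Int)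
    (hge : ∀ e ∈ l, ¬ e < s + 2) (acc : Int) :
    innerA capacity pre s l acc
      = innerB pre s (PySem.List.pyGetD pre (s + 1) 0 + PySem.List.pyGetD capacity s 0)
          (l.filter (fun e => PySem.List.pyGetD capacity e 0 == PySem.List.pyGetD capacity s 0))
          acc := by
  induction l generalizing acc with
  | nil => rfl
  | cons e rest ih =>
    have hge' : ∀ x ∈ rest, ¬ x < s + 2 := fun x hx => hge x (List.mem_cons_of_mem _ hx)
    have he : ¬ e < s + 2 := hge e List.mem_cons_self
    by_cases hv : PySem.List.pyGetD capacity s 0 = PySem.List.pyGetD capacity e 0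
    · simp only [innerA, List.filter_cons, hv.symm, beq_self_eq_true, if_pos, innerB, if_neg he]
      rw [if_neg (show ¬(PySem.List.pyGetD capacity s 0 ≠ PySem.List.pyGetD capacity s 0) from
        fun hc => hc rfl)]
      set P := PySem.List.pyGetD pre e 0
      set Q := PySem.List.pyGetD pre (s + 1) 0
      set v := PySem.List.pyGetD capacity s 0
      by_cases heq : v = P - Q
      · have h1 : P = Q + v := by omega
        have h2 : ¬ P - Q > v := by omega
        simp only [if_pos heq, if_neg h2, if_pos h1, ih hge']
      · have h1 : ¬ P = Q + v := by omega
        simp only [if_neg heq, if_neg h1]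
        by_cases hgt : P - Q > v
        · have h2 : P > Q + v := by omega
          simp only [if_pos hgt, if_pos h2]
        · have h2 : ¬ P > Q + v := by omega
          simp only [if_neg hgt, if_neg h2, ih hge']
    · simp only [innerA, if_pos hv, List.filter_cons]
      have : (PySem.List.pyGetD capacity e 0 == PySem.List.pyGetD capacity s 0) = false := by
        simp [Ne.symm hv]
      rw [this]
      simp only [Bool.false_eq_true, if_neg, not_false_eq_true, ih hge']

-- restricting range(0, n) to values ≥ m gives range(m, n)
theorem pyRange_filter_ge (n m : Int) (hm : 0 ≤ m) :
    (PySem.List.pyRange 0 n 1).filter (fun e => !decide (e < m))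
      = PySem.List.pyRange m n 1 := by
  by_cases hmn : m ≤ n
  · rw [PySem.List.pyRange_one_append 0 m n hm hmn, List.filter_append]
    rw [List.filter_eq_nil_iff.mpr, List.filter_eq_self.mpr, List.nil_append]
    · intro x hx
      have := (PySem.List.mem_pyRange_one).mp hx
      simp; omega
    · intro x hx
      have := (PySem.List.mem_pyRange_one).mp hx
      simp; omega
  · rw [PySem.List.pyRange_one_eq_nil (show n ≤ m by omega)]
    apply List.filter_eq_nil_iff.mpr
    intro x hx
    have := (PySem.List.mem_pyRange_one).mp hx
    simp; omega

theorem countStableSegments_eq_alt (capacity : List Int) :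
    countStableSegments capacity = countStableSegments_alt capacity := by
  unfold countStableSegments countStableSegments_alt
  simp only [prefA_eq_psums, prefB_eq_psums]
  apply PySem.List.foldl_congr_mem'
  intro s hs acc
  have hs0 : 0 ≤ s := ((PySem.List.mem_pyRange_one).mp hs).1
  have hge : ∀ e ∈ PySem.List.pyRange (s + 2) (capacity.length : Int) 1, ¬ e < s + 2 := by
    intro e he
    have := (PySem.List.mem_pyRange_one).mp he
    omega
  rw [innerA_eq_innerB capacity (psums capacity) s _ hge acc, posDict_getD]
  conv_rhs => rw [innerB_skip, List.filter_comm,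
    pyRange_filter_ge (capacity.length : Int) (s + 2) (by omega)]

-- ===== VERDICT (by name: the statement is the Claim_ definition above) =====
theorem countStableSegments_spec : Claim_equal_countStableSegments := by
  intro capacity _
  exact countStableSegments_eq_alt capacity
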